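-- pv_equiv track=rewrite | github.com/mariabaladuggimpudi/data-struct-n-algos | epi_judge_python/number_of_traversals_staircase.py | number_of_ways_to_top
-- ===== SOURCE A (Python) =====
-- def number_of_ways_to_top(top: int, maximum_step: int) -> int:
--     # TODO - you fill in here.
--
--     def number_of_ways_to_top_helper(h):
--
--         if h <= 1:
--             return 1
--
--         if number_of_ways[h] == 0:
--             number_of_ways[h] = sum(number_of_ways_to_top_helper(h - i) for i in range(1, min(maximum_step, h) +1))
--         return number_of_ways[h]
--
--     number_of_ways = [0] * (top+ 1)
--     return number_of_ways_to_top_helper(top)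
-- ===== SOURCE B (Python) =====
-- def number_of_ways_to_top(top: int, maximum_step: int) -> int:
--     # Bottom-up DP with a sliding-window running sum of the last
--     # maximum_step values: O(top) instead of O(top * maximum_step).
--     if top <= 1:
--         return 1
--     if maximum_step <= 0:
--         return 0
--     dp = [1, 1]
--     s = 2 if maximum_step >= 2 else 1
--     for h in range(2, top + 1):
--         v = s
--         dp.append(v)
--         s += v
--         if h >= maximum_step:
--             s -= dp[h - maximum_step]
--     return dp[top]
-- ===== Notes on version B (the rewrite author's own statement) =====
-- stated objective: faster
-- what changed: Replaced A's memoized top-down recursion, whose each table entry re-sums up to maximum_step recursive results, by a bottom-up iterative DP that keeps a sliding-window running sum of the last maximum_step table values, so each step is O(1). (Pre_ excludes top>=500 with maximum_step>=1, where A exceeds CPython's recursion limit and raises RecursionError.)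
import Mathlib
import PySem

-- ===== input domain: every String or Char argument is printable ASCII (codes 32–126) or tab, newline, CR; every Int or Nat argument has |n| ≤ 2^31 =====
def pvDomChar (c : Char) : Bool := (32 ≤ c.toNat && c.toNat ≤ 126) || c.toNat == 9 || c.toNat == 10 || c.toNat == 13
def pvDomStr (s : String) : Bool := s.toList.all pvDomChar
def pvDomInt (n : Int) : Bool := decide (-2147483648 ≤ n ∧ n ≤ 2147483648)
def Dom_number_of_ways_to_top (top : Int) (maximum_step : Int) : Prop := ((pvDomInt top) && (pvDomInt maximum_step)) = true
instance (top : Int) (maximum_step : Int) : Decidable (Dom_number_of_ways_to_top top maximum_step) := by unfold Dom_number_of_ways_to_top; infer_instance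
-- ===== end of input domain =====

-- B replaces A's memoized top-down recursion by a bottom-up DP with a sliding-window
-- running sum of the last maximum_step table values (objective: faster, O(top) vs O(top*maximum_step)).

-- ===== PORT A =====
-- number_of_ways_to_top_helper, with fuel making the recursion structural;
-- the 0-fuel branch is a totality guard only, never reached for fuel > h.toNat.
def helperA (m : Int) : Nat → Int → List Int → Int × List Int
  | fuel, h, memo =>
    if h ≤ 1 then (1, memo)
    else
      if (PySem.List.pyGetD memo h 0) = 0 then
        match fuel with
        | 0 => (0, memo)
        | f+1 =>
          let r := (PySem.List.pyRange 1 (min m h + 1) 1).foldl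
            (fun (st : Int × List Int) i =>
              let p := helperA m f (h - i) st.2
              (st.1 + p.1, p.2)) (0, memo)
          let memo' := PySem.List.pySetD r.2 h r.1
          (PySem.List.pyGetD memo' h 0, memo')
      else (PySem.List.pyGetD memo h 0, memo)

def number_of_ways_to_top (top : Int) (maximum_step : Int) : Int :=
  let number_of_ways := List.replicate (top + 1).toNat (0 : Int)
  (helperA maximum_step (top + 1).toNat top number_of_ways).1

-- ===== PORT B =====
-- the body of Source B's 'for h in range(2, top+1)' loop
def altStep (m : Int) (st : List Int × Int) (h : Int) : List Int × Int :=
  let v := st.2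
  let dp := st.1 ++ [v]
  let s := st.2 + v
  let s := if m ≤ h then s - PySem.List.pyGetD dp (h - m) 0 else s
  (dp, s)

def number_of_ways_to_top_alt (top : Int) (maximum_step : Int) : Int :=
  if top ≤ 1 then 1
  else if maximum_step ≤ 0 then 0
  else
    let init : List Int × Int := ([1, 1], if 2 ≤ maximum_step then 2 else 1)
    let r := (PySem.List.pyRange 2 (top + 1) 1).foldl (altStep maximum_step) init
    PySem.List.pyGetD r.1 top 0

-- ===== PRECONDITION & SPEC =====
-- Pre_ excludes exactly the inputs (top ≥ 500 together with maximum_step ≥ 1) on which A's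
-- unbounded recursion depth exceeds CPython's default recursion limit and A raises RecursionError;
-- everywhere else A returns normally.
def Pre_number_of_ways_to_top (top : Int) (maximum_step : Int) : Prop := top ≤ 499 ∨ maximum_step ≤ 0
instance (top : Int) (maximum_step : Int) : Decidable (Pre_number_of_ways_to_top top maximum_step) := by unfold Pre_number_of_ways_to_top; infer_instance
def pvWitness_number_of_ways_to_top : Int × Int := (7, 3)

def Spec_number_of_ways_to_top (top : Int) (maximum_step : Int) (out : Int) : Prop := out = number_of_ways_to_top_alt top maximum_step
instance (top : Int) (maximum_step : Int) (out : Int) : Decidable (Spec_number_of_ways_to_top top maximum_step out) := by unfold Spec_number_of_ways_to_top; infer_instance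

-- ===== CLAIM (what is proved, stated in full; the proofs are below) =====
def Claim_equal_number_of_ways_to_top : Prop := ∀ (top : Int) (maximum_step : Int), Dom_number_of_ways_to_top top maximum_step → Pre_number_of_ways_to_top top maximum_step → Spec_number_of_ways_to_top top maximum_step (number_of_ways_to_top top maximum_step)

-- ===== LEMMAS AND PROOFS =====

-- The count both programs compute: W m h = 1 for h ≤ 1, else the sum of W over the
-- previous min(m, h) values (the shape of A's recursion).
def W (m : Int) (h : Nat) : Int :=
  if h ≤ 1 then 1
  else (PySem.List.pyRange 1 (min m (h : Int) + 1) 1).attach.foldl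
    (fun a p => a + W m (((h : Int) - p.1).toNat)) 0
termination_by h
decreasing_by
  have := (PySem.List.mem_pyRange_one.mp p.2).1
  rename_i hh
  omega

lemma W_base (m : Int) (h : Nat) (hh : h ≤ 1) : W m h = 1 := by
  rw [W]; simp [hh]

lemma W_rec (m : Int) (h : Nat) (hh : 2 ≤ h) :
    W m h = (PySem.List.pyRange 1 (min m (h : Int) + 1) 1).foldl
      (fun a i => a + W m (((h : Int) - i).toNat)) 0 := by
  rw [W, if_neg (by omega)]
  exact List.foldl_attach (f := fun a i => a + W m (((h : Int)) - i).toNat) (b := 0)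

-- sliding-window sum: the last m values of W below k
def S (m : Int) (k : Nat) : Int := ∑ j ∈ Finset.Ico (k - m.toNat) k, W m j

lemma W_eq_S (m : Int) (k : Nat) (hm : 1 ≤ m) (hk : 2 ≤ k) : W m k = S m k := by
  have hk' : (2:Int) ≤ (k:Int) := by exact_mod_cast hk
  have h1 : (1:Int) ≤ min m (k:Int) := by omega
  rw [W_rec m k hk, PySem.List.foldl_add, PySem.List.pyRange_one]
  set n : Nat := (min m (k:Int) + 1 - 1).toNat with hn
  have hnk : n ≤ k := by omega
  have hn1 : 1 ≤ n := by omega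
  have hmap : (List.map (fun t : Nat => 1 + (t:Int)) (List.range n)).map (fun i => W m ((k:Int) - i).toNat)
      = (List.range n).map (fun t => W m (k - 1 - t)) := by
    rw [List.map_map]
    apply List.map_congr_left
    intro t ht
    have htn : t < n := List.mem_range.mp ht
    simp only [Function.comp]
    congr 1
    omega
  rw [hmap, zero_add]
  have hls : (List.map (fun t => W m (k - 1 - t)) (List.range n)).sum = ∑ t ∈ Finset.range n, W m (k - 1 - t) := rfl
  rw [hls, ← Finset.sum_range_reflect]
  unfold S
  rw [Finset.sum_Ico_eq_sum_range]
  apply Finset.sum_congr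
  · congr 1
    omega
  · intro t ht
    have := Finset.mem_range.mp ht
    congr 1
    omega

lemma S_two (m : Int) (hm : 1 ≤ m) : S m 2 = if 2 ≤ m then 2 else 1 := by
  unfold S
  by_cases h2 : 2 ≤ m
  · rw [if_pos h2, show 2 - m.toNat = 0 by omega, Nat.Ico_zero_eq_range,
      Finset.sum_range_succ, Finset.sum_range_succ]
    simp [W_base]
  · rw [if_neg h2, show 2 - m.toNat = 1 by omega, show Finset.Ico 1 2 = {1} by decide]
    simp [W_base]

lemma S_succ (m : Int) (k : Nat) (hm : 1 ≤ m) (hk : 2 ≤ k) :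
    S m (k+1) = S m k + W m k - (if m.toNat ≤ k then W m (k - m.toNat) else 0) := by
  unfold S
  rw [Finset.sum_Ico_succ_top (by omega)]
  by_cases hc : m.toNat ≤ k
  · rw [if_pos hc, Finset.sum_eq_sum_Ico_succ_bot (by omega : k - m.toNat < k)]
    rw [show k - m.toNat + 1 = k + 1 - m.toNat by omega]
    ring
  · rw [if_neg hc, show k + 1 - m.toNat = k - m.toNat by omega]
    ring

lemma W_of_nonpos (m : Int) (h : Nat) (hm : m ≤ 0) (hh : 2 ≤ h) : W m h = 0 := by
  rw [W_rec m h hh, PySem.List.pyRange_one_eq_nil (by omega)]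
  rfl

-- A-side: every memo entry is 0 (unfilled) or the correct count
def InvA (m : Int) (memo : List Int) : Prop :=
  ∀ j : Nat, memo.getD j 0 = 0 ∨ memo.getD j 0 = W m j

lemma helperA_spec (m : Int) (f : Nat) :
    ∀ (h : Int) (memo : List Int), h.toNat < f → 0 ≤ h → h.toNat < memo.length → InvA m memo →
    (helperA m f h memo).1 = W m h.toNat ∧
    (helperA m f h memo).2.length = memo.length ∧ InvA m (helperA m f h memo).2 := by
  induction f with
  | zero => intro h memo hf; omega
  | succ f ih =>
    intro h memo hf h0 hlen hinv
    rw [helperA]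
    by_cases hb : h ≤ 1
    · rw [if_pos hb]
      exact ⟨(W_base m h.toNat (by omega)).symm, rfl, hinv⟩
    · rw [if_neg hb]
      have hh2 : (2:Int) ≤ h := by omega
      have hget : PySem.List.pyGetD memo h 0 = memo.getD h.toNat 0 :=
        PySem.List.pyGetD_of_nonneg memo 0 h0
      by_cases hz : memo.getD h.toNat 0 = 0
      · rw [if_pos (by rw [hget]; exact hz)]
        -- the fold: each step is a recursive call at fuel f
        have foldA : ∀ (L : List Int) (acc : Int) (mem : List Int),
            (∀ i ∈ L, 1 ≤ i ∧ i ≤ h) → h.toNat < mem.length → InvA m mem →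
            (L.foldl (fun (st : Int × List Int) i =>
                let p := helperA m f (h - i) st.2
                (st.1 + p.1, p.2)) (acc, mem)).1
              = L.foldl (fun a i => a + W m ((h - i).toNat)) acc ∧
            (L.foldl (fun (st : Int × List Int) i =>
                let p := helperA m f (h - i) st.2
                (st.1 + p.1, p.2)) (acc, mem)).2.length = mem.length ∧
            InvA m (L.foldl (fun (st : Int × List Int) i =>
                let p := helperA m f (h - i) st.2
                (st.1 + p.1, p.2)) (acc, mem)).2 := by
          intro L
          induction L with
          | nil => intro acc mem _ _ hi; exact ⟨rfl, rfl, hi⟩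
          | cons i L ihL =>
            intro acc mem hmem hlen' hinv'
            have hi := hmem i (List.mem_cons_self ..)
            have hrec := ih (h - i) mem (by omega) (by omega) (by omega) hinv'
            simp only [List.foldl_cons]
            have := ihL (acc + (helperA m f (h - i) mem).1) (helperA m f (h - i) mem).2
              (fun j hj => hmem j (List.mem_cons_of_mem _ hj))
              (by omega) hrec.2.2
            exact ⟨this.1.trans (by rw [hrec.1]), this.2.1.trans hrec.2.1, this.2.2⟩
        have hmemL : ∀ i ∈ PySem.List.pyRange 1 (min m h + 1) 1, 1 ≤ i ∧ i ≤ h := by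
          intro i hi
          have := PySem.List.mem_pyRange_one.mp hi
          omega
        obtain ⟨f1, f2, f3⟩ := foldA (PySem.List.pyRange 1 (min m h + 1) 1) 0 memo hmemL hlen hinv
        set r := (PySem.List.pyRange 1 (min m h + 1) 1).foldl
            (fun (st : Int × List Int) i =>
              let p := helperA m f (h - i) st.2
              (st.1 + p.1, p.2)) (0, memo) with hr
        have hrW : r.1 = W m h.toNat := by
          rw [f1, W_rec m h.toNat (by omega)]
          have hcast : (h.toNat : Int) = h := by omega
          rw [hcast]
        have hset : PySem.List.pySetD r.2 h r.1 = r.2.set h.toNat r.1 :=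
          PySem.List.pySetD_of_nonneg r.2 r.1 h0
        simp only []
        rw [hset]
        have hlen2 : (r.2.set h.toNat r.1).length = memo.length := by
          rw [List.length_set]; omega
        have hget2 : PySem.List.pyGetD (r.2.set h.toNat r.1) h 0 = r.1 := by
          rw [PySem.List.pyGetD_of_nonneg _ 0 h0, List.getD_eq_getElem _ _ (by omega),
            List.getElem_set_self (by omega)]
        refine ⟨by rw [hget2, hrW], hlen2, ?_⟩
        intro j
        by_cases hj : j = h.toNat
        · subst hj
          right
          rw [List.getD_eq_getElem _ _ (by omega), List.getElem_set_self (by omega), hrW]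
        · rw [List.getD_eq_getElem?_getD, List.getElem?_set_ne (Ne.symm hj), ← List.getD_eq_getElem?_getD]
          exact f3 j
      · rw [if_neg (by rw [hget]; exact hz)]
        rcases hinv h.toNat with hc | hc
        · exact absurd hc hz
        · exact ⟨by rw [hget, hc], rfl, hinv⟩

-- B-side loop invariant: after h = 2 .. n+1 the table is W 0 .. W (n+1) and the
-- running sum is the next window sum
lemma B_loop (m : Int) (hm : 1 ≤ m) (n : Nat) :
    (PySem.List.pyRange 2 (2 + (n : Int)) 1).foldl (altStep m)
      ([1, 1], if 2 ≤ m then 2 else 1) =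
    ((List.range (n+2)).map (W m), S m (n+2)) := by
  induction n with
  | zero =>
    rw [show ((2:Int) + (0:Nat)) = 2 by norm_num, PySem.List.pyRange_one_eq_nil (by omega)]
    simp [List.foldl_nil, S_two m hm, List.range_succ, W_base]
  | succ n ih =>
    rw [show ((2:Int) + ((n+1 : Nat) : Int)) = (2 + (n:Int)) + 1 by push_cast; ring,
      PySem.List.pyRange_one_succ_right (by omega), List.foldl_append, ih]
    have hWS : S m (n+2) = W m (n+2) := (W_eq_S m (n+2) hm (by omega)).symm
    show altStep m _ _ = _
    unfold altStep
    simp only []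
    have hdp : (List.range (n+2)).map (W m) ++ [S m (n+2)] = (List.range (n+3)).map (W m) := by
      rw [hWS]
      have h3 : List.range (n+3) = List.range (n+2) ++ [n+2] := List.range_succ
      rw [h3, List.map_append, List.map_singleton]
    rw [hdp]
    refine Prod.ext rfl ?_
    simp only []
    rw [S_succ m (n+2) hm (by omega), hWS]
    by_cases hcond : m ≤ 2 + (n:Int)
    · rw [if_pos hcond, if_pos (by omega)]
      have hidx : (2 + (n:Int)) - m = ((n + 2 - m.toNat : Nat) : Int) := by omega
      rw [hidx, PySem.List.pyGetD_natCast]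
      rw [List.getD_eq_getElem _ _ (by simp only [List.length_map, List.length_range]; omega)]
      rw [List.getElem_map, List.getElem_range]
    · rw [if_neg hcond, if_neg (by omega)]
      ring

lemma A_eq_W (top m : Int) : number_of_ways_to_top top m =
    (if top ≤ 1 then 1 else W m top.toNat) := by
  show (helperA m (top + 1).toNat top (List.replicate (top + 1).toNat 0)).1 = _
  by_cases h1 : top ≤ 1
  · rw [if_pos h1, helperA.eq_def]
    dsimp only
    rw [if_pos h1]
  · rw [if_neg h1]
    refine (helperA_spec m (top+1).toNat top _ (by omega) (by omega)
      (by rw [List.length_replicate]; omega) ?_).1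
    intro j
    left
    rw [List.getD_eq_getElem?_getD, List.getElem?_replicate]
    by_cases hj : j < (top+1).toNat <;> simp [hj]

lemma alt_eq_W (top m : Int) : number_of_ways_to_top_alt top m =
    (if top ≤ 1 then 1 else if m ≤ 0 then 0 else W m top.toNat) := by
  unfold number_of_ways_to_top_alt
  by_cases h1 : top ≤ 1
  · rw [if_pos h1, if_pos h1]
  · rw [if_neg h1, if_neg h1]
    by_cases h2 : m ≤ 0
    · rw [if_pos h2, if_pos h2]
    · rw [if_neg h2, if_neg h2]
      have hm : 1 ≤ m := by omega
      show PySem.List.pyGetD ((PySem.List.pyRange 2 (top + 1) 1).foldl (altStep m)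
        ([1, 1], if 2 ≤ m then 2 else 1)).1 top 0 = W m top.toNat
      set n : Nat := (top - 1).toNat with hn
      have htop : top + 1 = 2 + (n : Int) := by omega
      rw [htop, B_loop m hm n]
      have hidx : top = ((n + 1 : Nat) : Int) := by omega
      rw [hidx, PySem.List.pyGetD_natCast,
        List.getD_eq_getElem _ _ (by simp only [List.length_map, List.length_range]; omega),
        List.getElem_map, List.getElem_range]
      congr 1

-- ===== VERDICT (by name: the statement is the Claim_ definition above) =====
theorem number_of_ways_to_top_spec : Claim_equal_number_of_ways_to_top := by
  intro top m _ _
  unfold Spec_number_of_ways_to_top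
  rw [A_eq_W, alt_eq_W]
  by_cases h1 : top ≤ 1
  · simp [h1]
  · by_cases h2 : m ≤ 0
    · simp [h1, h2, W_of_nonpos m top.toNat h2 (by omega)]
    · simp [h1, h2]
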